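-- pv_equiv track=rewrite | github.com/nocater/postgraduate | airquality/Q3show.py | compute_temperature
-- ===== SOURCE A (Python) =====
-- def compute_temperature(l):
--     r = []
--     for i in range(1, len(l)):
--         if (l[i] >= 20 and l[i - 1] >= 20):
--             r.append(1)
--         else:
--             r.append(0)
--     return r
--     pass
-- ===== SOURCE B (Python) =====
-- def compute_temperature(l):
--     n = len(l)
--     r = [1] * (n - 1)
--     for i, x in enumerate(l):
--         if x < 20:
--             if i > 0:
--                 r[i - 1] = 0
--             if i < n - 1:
--                 r[i] = 0
--     return r
-- ===== Notes on version B (the rewrite author's own statement) =====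
-- stated objective: alternative
-- what changed: Instead of testing both thresholds for each adjacent pair, B preallocates an all-ones answer of length n-1 and then, scanning once for cold readings (<20), zeroes out the one or two pair slots adjacent to each cold element.
import Mathlib
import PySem

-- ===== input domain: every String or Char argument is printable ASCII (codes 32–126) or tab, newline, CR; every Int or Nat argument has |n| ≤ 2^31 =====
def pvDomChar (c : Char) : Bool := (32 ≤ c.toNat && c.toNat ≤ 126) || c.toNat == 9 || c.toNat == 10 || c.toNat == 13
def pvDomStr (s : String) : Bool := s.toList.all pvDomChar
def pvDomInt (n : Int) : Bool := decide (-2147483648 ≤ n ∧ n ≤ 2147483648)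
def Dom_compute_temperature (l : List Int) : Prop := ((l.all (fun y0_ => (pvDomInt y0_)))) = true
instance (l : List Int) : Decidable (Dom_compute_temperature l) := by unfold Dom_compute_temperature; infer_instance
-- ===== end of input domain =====

-- B replaces A's pairwise two-threshold test by preallocating an all-ones answer and
-- zeroing the pair slots adjacent to each cold (<20) reading (alternative algorithm, same cost).

-- ===== PORT A =====
-- index loop over range(1, len(l)), appending 1 or 0 per branch
def compute_temperature (l : List Int) : List Int :=
  (PySem.List.pyRange 1 (l.length : Int) 1).foldl
    (fun r i =>
      if PySem.List.pyGetD l i 0 ≥ 20 ∧ PySem.List.pyGetD l (i - 1) 0 ≥ 20 then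
        r ++ [1]
      else
        r ++ [0]) []

-- ===== PORT B =====
-- loop body of B: on a cold reading x at index i, zero r[i-1] (if i>0) and r[i] (if i<n-1)
def pvStep (n : Int) (r : List Int) (p : Int × Int) : List Int :=
  if p.2 < 20 then
    let r1 := if p.1 > 0 then PySem.List.pySetD r (p.1 - 1) 0 else r
    if p.1 < n - 1 then PySem.List.pySetD r1 p.1 0 else r1
  else r

-- r = [1] * (n - 1); for i, x in enumerate(l): punch zeros around cold readings
def compute_temperature_alt (l : List Int) : List Int :=
  let n : Int := l.length
  (PySem.List.enumerate l 0).foldl (pvStep n) (List.replicate (n - 1).toNat 1)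

-- ===== PRECONDITION & SPEC =====
def Spec_compute_temperature (l : List Int) (out : List Int) : Prop := out = compute_temperature_alt l
instance (l : List Int) (out : List Int) : Decidable (Spec_compute_temperature l out) := by unfold Spec_compute_temperature; infer_instance

-- ===== CLAIM (what is proved, stated in full; the proofs are below) =====
def Claim_equal_compute_temperature : Prop := ∀ (l : List Int), Dom_compute_temperature l → Spec_compute_temperature l (compute_temperature l)

-- ===== LEMMAS AND PROOFS =====

-- whether the element (index p.1, value p.2) zeroes slot j
def pvHit (n : Int) (j : Nat) (p : Int × Int) : Bool :=
  decide (p.2 < 20 ∧ ((0 < p.1 ∧ (j : Int) = p.1 - 1) ∨ (p.1 < n - 1 ∧ (j : Int) = p.1)))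

-- whether any element of the enumerated suffix l' (offset k) zeroes slot j
def pvTouched (n : Int) (l' : List Int) (k : Int) (j : Nat) : Bool :=
  (PySem.List.enumerate l' k).any (pvHit n j)

theorem pvStep_length (n : Int) (r : List Int) (p : Int × Int) :
    (pvStep n r p).length = r.length := by
  unfold pvStep
  split_ifs <;> simp [PySem.List.length_pySetD]

theorem pvStep_getElem? (n : Int) (r : List Int) (p : Int × Int)
    (hr : (r.length : Int) = n - 1) (h0 : 0 ≤ p.1) (h1 : p.1 < n) (j : Nat) :
    (pvStep n r p)[j]? = if pvHit n j p then some 0 else r[j]? := by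
  obtain ⟨i, x⟩ := p
  simp only at h0 h1
  simp only [pvStep, pvHit]
  by_cases hx : x < 20
  · simp only [hx, if_pos, true_and]
    by_cases hi0 : i > 0 <;> by_cases hin : i < n - 1 <;>
      simp only [hi0, hin, if_pos, if_neg, not_false_iff, true_and, false_and, false_or, or_false]
    · rw [PySem.List.pySetD_of_nonneg _ _ (by omega), PySem.List.pySetD_of_nonneg _ _ (by omega),
        List.getElem?_set, List.getElem?_set]
      simp only [List.length_set]
      split_ifs <;> simp_all <;> omega
    · rw [PySem.List.pySetD_of_nonneg _ _ (by omega), List.getElem?_set]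
      split_ifs <;> simp_all <;> omega
    · rw [PySem.List.pySetD_of_nonneg _ _ (by omega), List.getElem?_set]
      split_ifs <;> simp_all <;> omega
    · split_ifs <;> simp_all <;> omega
  · simp [hx]

theorem pvFold_getElem? (n : Int) (l' : List Int) (k : Int) (r : List Int)
    (hr : (r.length : Int) = n - 1) (hk : 0 ≤ k) (hkn : k + l'.length ≤ n) (j : Nat) :
    ((PySem.List.enumerate l' k).foldl (pvStep n) r)[j]? =
      if pvTouched n l' k j then some 0 else r[j]? := by
  induction l' generalizing k r with
  | nil => simp [pvTouched, PySem.List.enumerate]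
  | cons x rest ih =>
    rw [PySem.List.enumerate_cons, List.foldl_cons]
    have hlen : ((pvStep n r (k, x)).length : Int) = n - 1 := by
      rw [pvStep_length]; exact hr
    rw [ih (k + 1) _ hlen (by omega) (by simp at hkn ⊢; omega)]
    rw [pvStep_getElem? n r (k, x) hr hk (by simp at hkn; omega)]
    have : pvTouched n (x :: rest) k j = (pvHit n j (k, x) || pvTouched n rest (k + 1) j) := by
      simp [pvTouched, PySem.List.enumerate_cons]
    rw [this]
    cases pvTouched n rest (k + 1) j <;> cases pvHit n j (k, x) <;> simp

theorem pvTouched_iff (l : List Int) (j : Nat) (hj : j + 1 < l.length) :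
    pvTouched (l.length : Int) l 0 j = true ↔
      (l[j]'(by omega) < 20 ∨ l[j + 1]'(by omega) < 20) := by
  unfold pvTouched
  rw [List.any_eq_true]
  constructor
  · rintro ⟨p, hp, hhit⟩
    rw [PySem.List.mem_enumerate_iff] at hp
    obtain ⟨m, hm, rfl⟩ := hp
    simp only [pvHit, zero_add, decide_eq_true_eq] at hhit
    obtain ⟨hcold, hcase⟩ := hhit
    rcases hcase with ⟨hpos, heq⟩ | ⟨_, heq⟩
    · right
      have : m = j + 1 := by omega
      subst this; exact hcold
    · left
      have : m = j := by omega
      subst this; exact hcold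
  · intro hc
    rcases hc with hc | hc
    · refine ⟨((j : Int), l[j]'(by omega)), ?_, ?_⟩
      · rw [PySem.List.mem_enumerate_iff]
        exact ⟨j, by omega, by simp⟩
      · simp only [pvHit, decide_eq_true_eq]
        refine ⟨hc, Or.inr ⟨by omega, by trivial⟩⟩
    · refine ⟨(((j + 1 : Nat) : Int), l[j + 1]'(by omega)), ?_, ?_⟩
      · rw [PySem.List.mem_enumerate_iff]
        exact ⟨j + 1, by omega, by simp⟩
      · simp only [pvHit, decide_eq_true_eq]
        refine ⟨hc, Or.inl ⟨by push_cast; omega, by push_cast; omega⟩⟩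

theorem alt_getElem? (l : List Int) (j : Nat) (hj : j + 1 < l.length) :
    (compute_temperature_alt l)[j]? =
      some (if 20 ≤ l[j]'(by omega) ∧ 20 ≤ l[j + 1]'(by omega) then 1 else 0) := by
  unfold compute_temperature_alt
  rw [pvFold_getElem? (l.length : Int) l 0 _ (by simp; omega) le_rfl (by simp)]
  by_cases ht : pvTouched (l.length : Int) l 0 j
  · rw [if_pos ht]
    rw [pvTouched_iff l j hj] at ht
    have : ¬ (20 ≤ l[j]'(by omega) ∧ 20 ≤ l[j + 1]'(by omega)) := by omega
    rw [if_neg this]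
  · rw [if_neg (by simpa using ht)]
    have ht' := (not_iff_not.mpr (pvTouched_iff l j hj)).mp (by simpa using ht)
    push_neg at ht'
    rw [if_pos (by omega)]
    simp [List.getElem?_replicate]
    omega

theorem pvFold_length (n : Int) (ps : List (Int × Int)) (r : List Int) :
    (ps.foldl (pvStep n) r).length = r.length := by
  induction ps generalizing r with
  | nil => rfl
  | cons p rest ih => rw [List.foldl_cons, ih, pvStep_length]

theorem alt_length (l : List Int) :
    (compute_temperature_alt l).length = l.length - 1 := by
  unfold compute_temperature_alt
  rw [pvFold_length]
  simp

theorem compute_temperature_eq_map (l : List Int) :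
    compute_temperature l =
      (PySem.List.pyRange 1 (l.length : Int) 1).map
        (fun i => if PySem.List.pyGetD l i 0 ≥ 20 ∧ PySem.List.pyGetD l (i - 1) 0 ≥ 20 then (1 : Int) else 0) := by
  unfold compute_temperature
  have h : (fun (r : List Int) (i : Int) =>
      if PySem.List.pyGetD l i 0 ≥ 20 ∧ PySem.List.pyGetD l (i - 1) 0 ≥ 20 then r ++ [1] else r ++ [0])
    = (fun (r : List Int) (i : Int) =>
      r ++ [if PySem.List.pyGetD l i 0 ≥ 20 ∧ PySem.List.pyGetD l (i - 1) 0 ≥ 20 then (1 : Int) else 0]) := by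
    funext r i; split <;> rfl
  rw [h, PySem.List.foldl_append_singleton_eq_map]
  simp

-- ===== VERDICT (by name: the statement is the Claim_ definition above) =====
theorem compute_temperature_spec : Claim_equal_compute_temperature := by
  intro l _
  unfold Spec_compute_temperature
  rw [compute_temperature_eq_map]
  apply List.ext_getElem?
  intro k
  by_cases hk : k + 1 < l.length
  · rw [alt_getElem? l k hk, List.getElem?_map]
    have hkr : k < (PySem.List.pyRange 1 (l.length : Int) 1).length := by
      rw [PySem.List.length_pyRange_one]; omega
    rw [List.getElem?_eq_getElem hkr]
    simp only [Option.map_some, PySem.List.getElem_pyRange_one]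
    have hget1 : PySem.List.pyGetD l ((1 : Int) + (k : Int)) 0 = l[k + 1]'(by omega) := by
      have h : ((1 : Int) + (k : Int)) = ((k + 1 : Nat) : Int) := by push_cast; ring
      rw [h, PySem.List.pyGetD_natCast]
      simp [List.getElem?_eq_getElem (show k + 1 < l.length by omega)]
    have hget0 : PySem.List.pyGetD l ((1 : Int) + (k : Int) - 1) 0 = l[k]'(by omega) := by
      have h : ((1 : Int) + (k : Int) - 1) = ((k : Nat) : Int) := by push_cast; ring
      rw [h, PySem.List.pyGetD_natCast]
      simp [List.getElem?_eq_getElem (show k < l.length by omega)]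
    rw [hget1, hget0]
    split_ifs <;> first | rfl | omega
  · rw [List.getElem?_eq_none, List.getElem?_eq_none]
    · rw [alt_length]; omega
    · rw [List.length_map, PySem.List.length_pyRange_one]; omega
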